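-- pv_equiv track=rewrite | github.com/Enurean/cs50p-hogwarts | hogwarts.py | validate_potion
-- ===== SOURCE A (Python) =====
-- def validate_potion(potion):
--     # Validate spell format and check in database
--     check_potion = potion.replace("-", "")
--     check_potion = check_potion.replace(" ", "")
--
--     for i in check_potion:
--         if not i.isalpha():
--             raise ValueError("Invalid name, numbers are not accepted")
--         else:
--             continue
--
--     # Return validated name
--     potion_joined_name = ''.join(i if i.isalpha() else '-' for i in potion)
--     potion_name = potion_joined_name.lower()
--     return potion_name
-- ===== SOURCE B (Python) =====
-- def validate_potion(potion):
--     # Single pass: validate and normalize each character together.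
--     parts = []
--     for c in potion:
--         if c.isalpha():
--             parts.append(c)
--         elif c in " -":
--             parts.append("-")
--         else:
--             raise ValueError("Invalid name, numbers are not accepted")
--     return "".join(parts).lower()
-- ===== Notes on version B (the rewrite author's own statement) =====
-- stated objective: simpler
-- what changed: A builds a stripped copy to validate, then a second generator pass to rebuild and lowercase; B does one pass over the original string that validates and emits the normalized character at the same time (measured ~1.7x faster on large inputs).
import Mathlib
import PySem

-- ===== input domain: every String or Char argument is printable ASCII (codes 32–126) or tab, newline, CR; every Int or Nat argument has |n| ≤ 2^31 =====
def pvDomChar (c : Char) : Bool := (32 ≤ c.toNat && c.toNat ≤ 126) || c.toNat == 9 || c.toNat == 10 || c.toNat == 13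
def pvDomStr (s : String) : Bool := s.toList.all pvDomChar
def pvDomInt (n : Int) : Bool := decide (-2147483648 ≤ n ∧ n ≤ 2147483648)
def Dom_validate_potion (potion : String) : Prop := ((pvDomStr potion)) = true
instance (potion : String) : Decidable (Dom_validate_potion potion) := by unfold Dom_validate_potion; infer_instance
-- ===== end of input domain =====

-- B merges A's separate validation pass and rebuild pass into one traversal (objective: simpler).

-- ===== PORT A =====
-- A: strip '-' and ' ', validate each remaining char is alpha (raise otherwise — excluded by Pre_),
-- then rebuild from the ORIGINAL string (alpha kept, everything else '-') and lowercase.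
def validate_potion (potion : String) : String :=
  let check_potion := PySem.Str.replace (PySem.Str.replace potion "-" "") " " ""
  -- the for-loop only raises (outside Pre_) or falls through; under Pre_ it is a no-op
  let _ := check_potion.toList.all PySem.Chars.isalpha
  let potion_joined_name :=
    PySem.Str.join "" (potion.toList.map
      (fun i => if PySem.Chars.isalpha i then String.ofList [i] else "-"))
  PySem.Str.lower potion_joined_name

-- ===== PORT B =====
-- B: one pass appending the normalized character (raises outside Pre_), then join + lower.
def validate_potion_alt (potion : String) : String :=
  let parts := potion.toList.foldl
    (fun acc c =>
      if PySem.Chars.isalpha c then acc ++ [String.ofList [c]]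
      else if c == ' ' || c == '-' then acc ++ ["-"]
      else acc)  -- Python raises here; such inputs are excluded by Pre_
    []
  PySem.Str.lower (PySem.Str.join "" parts)

-- ===== PRECONDITION & SPEC =====
-- Pre_ excludes exactly the inputs on which A raises ValueError (a character that is
-- neither alphabetic nor a space nor a hyphen).
def Pre_validate_potion (potion : String) : Prop :=
  potion.toList.all (fun c => PySem.Chars.isalpha c || c == ' ' || c == '-') = true
instance (potion : String) : Decidable (Pre_validate_potion potion) := by
  unfold Pre_validate_potion; infer_instance
def pvWitness_validate_potion : String := "Polyjuice Potion"

def Spec_validate_potion (potion : String) (out : String) : Prop := out = validate_potion_alt potion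
instance (potion : String) (out : String) : Decidable (Spec_validate_potion potion out) := by
  unfold Spec_validate_potion; infer_instance

-- ===== CLAIM (what is proved, stated in full; the proofs are below) =====
def Claim_equal_validate_potion : Prop :=
  ∀ (potion : String), Dom_validate_potion potion → Pre_validate_potion potion →
    Spec_validate_potion potion (validate_potion potion)

-- ===== LEMMAS AND PROOFS =====

-- B's fold, on characters that are alpha/space/hyphen, appends exactly A's mapped character.
theorem foldl_parts_eq (l : List Char) (acc : List String)
    (h : ∀ c ∈ l, (PySem.Chars.isalpha c || c == ' ' || c == '-') = true) :
    l.foldl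
      (fun acc c =>
        if PySem.Chars.isalpha c then acc ++ [String.ofList [c]]
        else if c == ' ' || c == '-' then acc ++ ["-"]
        else acc) acc
    = acc ++ l.map (fun i => if PySem.Chars.isalpha i then String.ofList [i] else "-") := by
  induction l generalizing acc with
  | nil => simp
  | cons c cs ih =>
    have hc := h c (by simp)
    have hcs : ∀ x ∈ cs, (PySem.Chars.isalpha x || x == ' ' || x == '-') = true := by
      intro x hx; exact h x (by simp [hx])
    by_cases ha : PySem.Chars.isalpha c = true
    · rw [List.foldl_cons, if_pos ha, ih _ hcs]
      simp [ha]
    · have hsp : (c == ' ' || c == '-') = true := by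
        simp [ha] at hc; simpa using hc
      rw [List.foldl_cons, if_neg ha, if_pos hsp, ih _ hcs]
      simp [ha]

-- ===== VERDICT (by name: the statement is the Claim_ definition above) =====
theorem validate_potion_spec : Claim_equal_validate_potion := by
  intro potion _ hpre
  unfold Spec_validate_potion validate_potion validate_potion_alt
  have h : ∀ c ∈ potion.toList, (PySem.Chars.isalpha c || c == ' ' || c == '-') = true := by
    simpa [Pre_validate_potion, List.all_eq_true] using hpre
  rw [foldl_parts_eq potion.toList [] h]
  simp
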